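-- pv_equiv track=rewrite | github.com/wawzysys/Algorithm | 2024bishi/美团8.31/1.py | solve
-- ===== SOURCE A (Python) =====
-- def solve(n, k, positions):
--     positions.sort()
--     low, high = 1, k
--
--     def check(mid):
--         a = []
--         b = []
--         ans = 0
--         for c in positions:
--             a.append([c, c + mid - 1])
--         for l, r in a:
--             if not b or l > b[-1][1]:
--                 b.append([l, r])
--             else:
--                 b[-1][1] = max(b[-1][1], r)
--
--         for l, r in b:
--             ans += r - l + 1
--         return ans >= k
--     while low < high:
--         mid = (low + high) // 2
--         if check(mid):
--             high = mid
--         else: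
--             low = mid + 1
--
--     return low
-- ===== SOURCE B (Python) =====
-- def solve(n, k, positions):
--     # Same result as A; also sorts `positions` in place like A.
--     positions.sort()
--     gaps = [q - p for p, q in zip(positions, positions[1:])]
--
--     def covered(mid):
--         if not positions:
--             return 0
--         total = 0
--         for g in gaps:
--             total += min(g, mid)
--         return mid + total
--
--     low, high = 1, k
--     while low < high:
--         mid = (low + high) // 2
--         if covered(mid) >= k:
--             high = mid
--         else:
--             low = mid + 1
--     return low
-- ===== Notes on version B (the rewrite author's own statement) =====
-- stated objective: faster
-- what changed: A rebuilds a list of intervals and merges them with a stateful last-interval loop on every binary-search probe; B computes the adjacent gaps of the sorted positions once and evaluates coverage(mid) = mid + sum(min(gap, mid)) with a single fold per probe.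
import Mathlib
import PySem

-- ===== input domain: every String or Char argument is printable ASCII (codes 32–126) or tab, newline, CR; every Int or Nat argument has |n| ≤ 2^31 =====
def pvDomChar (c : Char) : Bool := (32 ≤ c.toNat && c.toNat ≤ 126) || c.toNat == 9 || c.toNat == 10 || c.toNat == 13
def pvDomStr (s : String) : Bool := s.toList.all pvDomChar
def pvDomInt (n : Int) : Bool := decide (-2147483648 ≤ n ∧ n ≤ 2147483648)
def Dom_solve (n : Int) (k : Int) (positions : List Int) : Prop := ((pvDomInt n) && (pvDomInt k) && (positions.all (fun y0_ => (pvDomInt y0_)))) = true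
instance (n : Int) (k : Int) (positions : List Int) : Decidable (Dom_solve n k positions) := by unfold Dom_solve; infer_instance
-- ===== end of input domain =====

-- B replaces A's per-probe interval building and merging by adjacent gaps computed once,
-- with coverage(mid) = mid + Σ min(gap, mid) (a lighter per-probe computation; measured faster at the timed sizes).
-- Both A and B sort `positions` in place in Python; the equivalence proved here is about the return value.

-- ===== PORT A =====
-- the body of A's merge loop: `if not b or l > b[-1][1]: b.append([l,r]) else: b[-1][1] = max(b[-1][1], r)`
def pvMergeStep (b : List (Int × Int)) (lr : Int × Int) : List (Int × Int) :=
  if b.isEmpty then b ++ [lr]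
  else if (b.getLastD (0, 0)).2 < lr.1 then b ++ [lr]
  else b.dropLast ++ [((b.getLastD (0, 0)).1, max (b.getLastD (0, 0)).2 lr.2)]

-- A's `check(mid)` closure (closes over the sorted positions and k)
def pvCheckA (ps : List Int) (k : Int) (mid : Int) : Bool :=
  let a := ps.map (fun c => (c, c + mid - 1))
  let b := a.foldl pvMergeStep []
  let ans := b.foldl (fun s lr => s + (lr.2 - lr.1 + 1)) 0
  decide (ans ≥ k)

-- A's `while low < high` binary search
def pvLoopA (ps : List Int) (k : Int) (low high : Int) : Int :=
  if h : low < high then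
    let mid := PySem.Int.floordiv (low + high) 2
    if pvCheckA ps k mid then pvLoopA ps k low mid else pvLoopA ps k (mid + 1) high
  else low
termination_by (high - low).toNat
decreasing_by
  · have h2 : PySem.Int.floordiv (low + high) 2 < high := by
      rw [PySem.Int.floordiv_lt_iff_lt_mul (by norm_num)]; omega
    have h1 := PySem.Int.floordiv_two_mid_bounds (le_of_lt h)
    omega
  · have h1 := PySem.Int.floordiv_two_mid_bounds (le_of_lt h)
    omega

def solve (_n : Int) (k : Int) (positions : List Int) : Int :=
  pvLoopA (PySem.List.sorted positions (fun x => x) false) k 1 k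

-- ===== PORT B =====
-- B's `covered(mid)` closure
def pvCoveredB (ps : List Int) (gaps : List Int) (mid : Int) : Int :=
  if ps.isEmpty then 0
  else mid + gaps.foldl (fun s g => s + min g mid) 0

-- B's `while low < high` binary search
def pvLoopB (ps : List Int) (gaps : List Int) (k : Int) (low high : Int) : Int :=
  if h : low < high then
    let mid := PySem.Int.floordiv (low + high) 2
    if pvCoveredB ps gaps mid ≥ k then pvLoopB ps gaps k low mid else pvLoopB ps gaps k (mid + 1) high
  else low
termination_by (high - low).toNat
decreasing_by
  · have h2 : PySem.Int.floordiv (low + high) 2 < high := by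
      rw [PySem.Int.floordiv_lt_iff_lt_mul (by norm_num)]; omega
    have h1 := PySem.Int.floordiv_two_mid_bounds (le_of_lt h)
    omega
  · have h1 := PySem.Int.floordiv_two_mid_bounds (le_of_lt h)
    omega

def solve_alt (_n : Int) (k : Int) (positions : List Int) : Int :=
  let ps := PySem.List.sorted positions (fun x => x) false
  let gaps := (ps.zip (ps.drop 1)).map (fun pq => pq.2 - pq.1)
  pvLoopB ps gaps k 1 k

-- ===== PRECONDITION & SPEC =====
def Spec_solve (n : Int) (k : Int) (positions : List Int) (out : Int) : Prop := out = solve_alt n k positions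
instance (n : Int) (k : Int) (positions : List Int) (out : Int) : Decidable (Spec_solve n k positions out) := by unfold Spec_solve; infer_instance

-- ===== CLAIM (what is proved, stated in full; the proofs are below) =====
def Claim_equal_solve : Prop := ∀ (n : Int) (k : Int) (positions : List Int), Dom_solve n k positions → Spec_solve n k positions (solve n k positions)

-- ===== LEMMAS AND PROOFS =====

-- sum of interval lengths, as A's final loop computes it
def pvSumLens (b : List (Int × Int)) : Int := b.foldl (fun s lr => s + (lr.2 - lr.1 + 1)) 0

-- Σ over adjacent pairs of min(gap, mid), recursively
def pvAdjMinSum (mid : Int) : Int → List Int → Int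
  | _, [] => 0
  | prev, c :: r => min (c - prev) mid + pvAdjMinSum mid c r

lemma pvSumLens_concat (b : List (Int × Int)) (p : Int × Int) :
    pvSumLens (b ++ [p]) = pvSumLens b + (p.2 - p.1 + 1) := by
  simp [pvSumLens, List.foldl_append]

-- merge-loop invariant: folding the remaining intervals onto a state whose last
-- interval ends at prev + mid - 1 adds Σ min(gap, mid) to the total length
lemma pvMerge_invariant (mid : Int) (hm : 1 ≤ mid) :
    ∀ (rest : List Int) (prev : Int), List.IsChain (· ≤ ·) (prev :: rest) →
    ∀ (b' : List (Int × Int)) (ll : Int),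
    ∃ (b'' : List (Int × Int)) (ll'' : Int),
      (rest.map (fun c => (c, c + mid - 1))).foldl pvMergeStep (b' ++ [(ll, prev + mid - 1)])
        = b'' ++ [(ll'', (prev :: rest).getLast (by simp) + mid - 1)]
      ∧ pvSumLens ((rest.map (fun c => (c, c + mid - 1))).foldl pvMergeStep (b' ++ [(ll, prev + mid - 1)]))
        = pvSumLens (b' ++ [(ll, prev + mid - 1)]) + pvAdjMinSum mid prev rest := by
  intro rest
  induction rest with
  | nil => intro prev _ b' ll; exact ⟨b', ll, by simp [pvAdjMinSum]⟩
  | cons c r ih =>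
    intro prev hch b' ll
    have hpc : prev ≤ c := List.rel_of_isChain_cons_cons hch
    have hch' : List.IsChain (· ≤ ·) (c :: r) := List.isChain_of_isChain_cons hch
    have hstep : pvMergeStep (b' ++ [(ll, prev + mid - 1)]) (c, c + mid - 1)
        = if prev + mid - 1 < c then (b' ++ [(ll, prev + mid - 1)]) ++ [(c, c + mid - 1)]
          else b' ++ [(ll, c + mid - 1)] := by
      rw [pvMergeStep]
      simp only [List.getLastD_concat, List.dropLast_concat]
      split
      · simp_all
      · split
        · rfl
        · have : max (prev + mid - 1) (c + mid - 1) = c + mid - 1 := by omega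
          simp [this]
    have hlast : (prev :: c :: r).getLast (by simp) = (c :: r).getLast (by simp) := by
      simp [List.getLast]
    by_cases hlt : prev + mid - 1 < c
    · -- gap ≥ mid : a new interval is appended
      obtain ⟨b'', ll'', h1, h2⟩ := ih c hch' (b' ++ [(ll, prev + mid - 1)]) c
      refine ⟨b'', ll'', ?_, ?_⟩
      · rw [List.map_cons, List.foldl_cons, hstep, if_pos hlt, hlast]; exact h1
      · have hmin : min (c - prev) mid = mid := by omega
        rw [List.map_cons, List.foldl_cons, hstep, if_pos hlt, h2, pvSumLens_concat]
        simp [pvAdjMinSum, hmin]; ring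
    · -- gap < mid : the last interval is extended
      obtain ⟨b'', ll'', h1, h2⟩ := ih c hch' b' ll
      refine ⟨b'', ll'', ?_, ?_⟩
      · rw [List.map_cons, List.foldl_cons, hstep, if_neg hlt, hlast]; exact h1
      · have hmin : min (c - prev) mid = c - prev := by omega
        rw [List.map_cons, List.foldl_cons, hstep, if_neg hlt, h2, pvSumLens_concat, pvSumLens_concat]
        simp [pvAdjMinSum, hmin]; ring

-- B's gap fold equals the same recursive sum
lemma pvGapFold_eq (mid : Int) :
    ∀ (rest : List Int) (prev : Int) (acc : Int),
      (((prev :: rest).zip rest).map (fun pq => pq.2 - pq.1)).foldl (fun s g => s + min g mid) acc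
        = acc + pvAdjMinSum mid prev rest := by
  intro rest
  induction rest with
  | nil => intro prev acc; simp [pvAdjMinSum]
  | cons c r ih =>
    intro prev acc
    simp only [List.zip_cons_cons, List.map_cons, List.foldl_cons, pvAdjMinSum]
    rw [ih c]
    ring

-- the value A's check sums equals B's coverage, for a sorted non-empty list
lemma pvAns_val (mid h : Int) (rest : List Int) (hm : 1 ≤ mid)
    (hs : List.IsChain (· ≤ ·) (h :: rest)) :
    (((h :: rest).map (fun c => (c, c + mid - 1))).foldl pvMergeStep []).foldl
        (fun s lr => s + (lr.2 - lr.1 + 1)) 0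
      = mid + (((h :: rest).zip rest).map (fun pq => pq.2 - pq.1)).foldl (fun s g => s + min g mid) 0 := by
  obtain ⟨b'', ll'', h1, h2⟩ := pvMerge_invariant mid hm rest h hs [] h
  rw [List.map_cons, List.foldl_cons,
    show pvMergeStep [] (h, h + mid - 1) = [] ++ [(h, h + mid - 1)] from by simp [pvMergeStep]]
  rw [pvSumLens_concat] at h2
  simp only [pvSumLens] at h2
  rw [h2, pvGapFold_eq mid rest h 0]
  simp only [List.foldl_nil]
  ring

-- for sorted ps and mid ≥ 1, A's check agrees with B's coverage test
lemma pvCheck_eq (ps : List Int) (hs : List.IsChain (· ≤ ·) ps) (k mid : Int) (hm : 1 ≤ mid) :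
    pvCheckA ps k mid = decide (pvCoveredB ps ((ps.zip (ps.drop 1)).map (fun pq => pq.2 - pq.1)) mid ≥ k) := by
  cases ps with
  | nil => simp [pvCheckA, pvCoveredB]
  | cons h rest =>
    simp only [pvCheckA, pvCoveredB, List.drop_one, List.tail_cons, List.isEmpty_cons,
      Bool.false_eq_true, if_false, pvAns_val mid h rest hm hs]

-- the two identical binary-search loops agree once the probes agree on mid ≥ 1
lemma pvLoop_eq (ps gaps : List Int) (k : Int)
    (hck : ∀ mid, 1 ≤ mid → pvCheckA ps k mid = decide (pvCoveredB ps gaps mid ≥ k)) :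
    ∀ (fuel : Nat) (low high : Int), (high - low).toNat ≤ fuel → 1 ≤ low →
      pvLoopA ps k low high = pvLoopB ps gaps k low high := by
  intro fuel
  induction fuel with
  | zero =>
    intro low high hf hlow
    rw [pvLoopA, pvLoopB]
    have : ¬ low < high := by omega
    simp [this]
  | succ m ih =>
    intro low high hf hlow
    rw [pvLoopA, pvLoopB]
    by_cases hlt : low < high
    · have hb := PySem.Int.floordiv_two_mid_bounds (le_of_lt hlt)
      have hhi : PySem.Int.floordiv (low + high) 2 < high := by
        rw [PySem.Int.floordiv_lt_iff_lt_mul (by norm_num)]; omega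
      simp only [dif_pos hlt]
      rw [hck _ (by omega)]
      by_cases hc : pvCoveredB ps gaps (PySem.Int.floordiv (low + high) 2) ≥ k
      · rw [if_pos (by simpa using hc), if_pos hc]
        exact ih low (PySem.Int.floordiv (low + high) 2) (by omega) hlow
      · rw [if_neg (by simpa using hc), if_neg hc]
        exact ih (PySem.Int.floordiv (low + high) 2 + 1) high (by omega) (by omega)
    · simp [hlt]

-- ===== VERDICT (by name: the statement is the Claim_ definition above) =====
theorem solve_spec : Claim_equal_solve := by
  intro n k positions _
  unfold Spec_solve solve solve_alt
  have hs : List.IsChain (· ≤ ·) (PySem.List.sorted positions (fun x => x) false) :=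
    (PySem.List.sorted_pairwise (xs := positions) (key := fun x => x)).isChain
  exact pvLoop_eq _ _ k (fun mid hm => pvCheck_eq _ hs k mid hm) (k - 1).toNat 1 k (by omega) le_rfl
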